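/- GENERATED by mk_final_copies.py from the proof of the farm's unit `start_decoder.C5c` (farm:start_decoder.C5c.1: Proof.lean) as the
   re-elaboration sweep compiled it — do not edit. -/
import Asan.CheckWalk
import Vorbis.Spec.StartDecoderC4
import Vorbis.Spec.Units.start_decoder_C5c

open X86 X86.User Asan Vorbis Vorbis.Spec Vorbis.Spec.StartDecoder

set_option maxRecDepth 100000
set_option maxHeartbeats 4000000

namespace Vorbis.Spec.start_decoder_C5c

/-- **Where `*f` is** (as `c14a_obj_where` of the worked unit C14a): in the data space, and off the part of the stack below the
steady stack pointer `R`. -/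
theorem c5c_obj_where {g : Ghost} {i : Nat} {A2 A3 Ai : Arena} {A : Arena × List Obj} {v : State} (h : Cur g i A2 A3 Ai A v)
    (hsh : ShadowInv A.2 g.frames' g.R v.mem) (hoff : ∀ o, o ∈ A.2 → L.textHi ≤ o.base) :
    0x119d40 ≤ g.f ∧ g.f + 1808 ≤ 0xC00000 ∧ (g.R ≤ g.f ∨ g.f + 1808 ≤ 0x700000 ∨ 0x800000 ≤ g.f) := by
  have hl : LiveIn A.2 g.frames' g.f Off.sizeof.stb_vorbis := by
    apply h.hand.obj.mono
    intro o ho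
    unfold Ghost.frames'
    rw [stackObjs_cons]
    rcases List.mem_append.mp ho with hs | ho'
    · exact List.mem_append_left _ (List.mem_append_right _ hs)
    · exact List.mem_append_right _ ho'
  have hw := hl.where_ hsh hoff (by simp only [voff]; omega)
  simp only [voff] at hw
  exact hw

/-- **The LIFO precondition of `setup_temp_free(f, lengths, E)` at 0x114631**: the state `s` at the callee's entry has the memory of
the cut point but for the pushed return address below `R`; P1 = (lengths, E) is the only temp block, so it is the top one and
`lengths = B + T` (`ArenaOK.top_eq_T`). -/
theorem c5c_free_pre {u₀ : State} {g : Ghost} {i : Nat} {A2 A3 Ai : Arena} {A : Arena × List Obj} {pc : Word} {v s : State}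
    {lengths E : Nat} (hfr : Frame u₀ g pc A v) (hcur : Cur g i A2 A3 Ai A v) (htemps : TempsAre A.1 [(lengths, E)])
    (hun : ShadowUntouched v.mem s.mem) (hmem : Mem.EqOn (g.f + 112) (g.f + 136) v.mem s.mem)
    (hrsp : (s.reg .rsp).toNat + 8 = g.R) (hrdi : (s.reg .rdi).toNat = g.f) (hrsi : (s.reg .rsi).toNat = lengths)
    (hrdx : (s.reg .rdx).toNat % 2 ^ 32 = E) :
    (setup_temp_free.spec A.2 g.frames' A.1 E []).pre s ∧ A.1.temps = [(A.1.T, E)] ∧ lengths = A.1.B + A.1.T := by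
  have hob := hcur.sd.bits.OB1
  obtain ⟨hf1, hf2, _⟩ := c5c_obj_where hcur hfr.shadow hfr.offText
  have ht1 : A.1.temps = [(lengths - A.1.B, E)] := htemps.1
  have ht2 : A.1.B ≤ lengths := htemps.2 (lengths, E) (List.mem_singleton.mpr rfl)
  obtain ⟨htop, _⟩ := hcur.sd.arena.top_eq_T ht1
  have hT : A.1.temps = [(A.1.T, E)] := by
    rw [ht1, htop]
  have hl : lengths = A.1.B + A.1.T := by omega
  refine ⟨⟨⟨⟨?_, hfr.offText⟩, ?_, ?_, hcur.hand.arenaText⟩, Or.inr ⟨hT, ?_, ?_, ?_⟩⟩, hT, hl⟩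
  · rw [hrsp]
    exact hfr.shadow.untouched hun
  · rw [hrdi]
    exact hcur.sd.env.live _ hob
  · rw [hrdi]
    apply hcur.sd.arena.frame (by simp only [voff]; omega)
    simp only [voff]
    exact hmem
  · rw [hrsi, hl]
  · rw [hrdx]
  · rw [hrdi]
    exact setup_temp_free.apart_of_out hcur.sd.arena hT hcur.hand.objOut

/-- **`In5O` from the return of `setup_temp_free`, pure part**: `Frame` and `Cur` at the returned state `w` for the ghost `A'` with
the same setup blocks and no temp block, `cb(i)` unmoved, every setup block of `A` kept. -/
theorem c5c_build {u₀ : State} {g : Ghost} {i : Nat} {A2 A3 Ai : Arena} {A A' : Arena × List Obj} {lengths : Nat} {v w : State}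
    (h : In5N u₀ g i A2 A3 Ai A lengths v) (hF : Frame u₀ g L.start_decoder.cut112 A' w) (hC : Cur g i A2 A3 Ai A' w)
    (hcb : g.cb w.mem i = g.cb v.mem i) (hkept : AllKept A.1.Blk v.mem w.mem)
    (hblk : ∀ B, Since Ai A.1 B → Since Ai A'.1 B) (htemps : A'.1.temps = []) :
    In5O u₀ g i A2 A3 Ai A' w := by
  have hcbOK := h.cur.ages.cbOK
  have hkI : AllKept Ai.Blk v.mem w.mem := fun B hB => hkept B (hB.mono h.cur.ages.exti)
  have hstruct : (Codebook.block (g.cb v.mem i)).Kept v.mem w.mem := hcbOK.cb_kept (hkI _ hcbOK.F2) i h.cur.lt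
  have hsf := Codebook.SameFields.of_kept hstruct
  have hp : (Block.mk (Codebook.codeword_lengths v.mem (g.cb v.mem i)) (Codebook.entries v.mem (g.cb v.mem i)).toNat).Kept
      v.mem w.mem := hkept _ h.block.1
  exact
    { frame := hF
      cur := hC
      k1 := by rw [hcb]; exact h.k1.frame hsf
      sparse1 := by rw [hcb, hsf.sparse]; exact h.sparse1
      block := by rw [hcb, hsf.codeword_lengths, hsf.entries]; exact hblk _ h.block
      lenL := by rw [hcb, hsf.codeword_lengths, hsf.entries]; exact h.lenL.same hp.same hp.inside
      noTemps := htemps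
      fresh := by
        rw [hcb]
        exact ⟨⟨⟨by rw [hsf.lookup_type]; exact h.fresh.lookup_type, by rw [hsf.lookup_values]; exact h.fresh.lookup_values,
          by rw [hsf.multiplicands]; exact h.fresh.multiplicands⟩,
          by rw [hsf.sorted_codewords]; exact h.fresh.sorted_codewords, by rw [hsf.sorted_values]; exact h.fresh.sorted_values⟩,
          by rw [hsf.codewords]; exact h.fresh.codewords, by rw [hsf.sorted_entries]; exact h.fresh.sorted_entries⟩ }

/-- Segment C5c: the checked load of `c->entries` and the walk over `call setup_temp_free` (`Cur.free_call`). -/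
theorem c5c_walk
    (Lay : Layout) (hLay : Lay.hi = 0x1000000) (μ : Microarch) (hμ : UserX.MicroOK μ) (u₀ : State)
    (hcode : HasCodeNat Lay u₀ Vorbis.L.start_decoder.entry Vorbis.Code.code_start_decoder.nat Vorbis.L.start_decoder.size)
    (hld4 : Asan.SmallCheck Lay μ Vorbis.WayInv (Vorbis.CodeOK u₀) [.rax, .rcx, .rdx] 4 Vorbis.L.__asan_load4_noabort.entry)
    (hfree : ∀ (others : List Obj) (frames : List (Nat × FrameLayout)) (A : Arena) (m : Nat) (rest : List (Nat × Nat)), Calls Lay μ Vorbis.WayInv (Vorbis.conv u₀) Vorbis.L.setup_temp_free.entry (Vorbis.Spec.setup_temp_free.spec others frames A m rest)) :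
    SegC5c Lay μ u₀ := by
  intro g i v hat
  obtain ⟨A, lengths, A2, A3, Ai, h⟩ := hat
  have he := h.frame.entry
  v_entry he
  have w_rip := h.frame.rip
  have hfr0 := h.frame
  have hcur := h.cur
  have hshad := h.frame.shadow
  have hpos : Pos g A := Pos.of hfr0 hcur
  have p1 := hpos.r_eq
  have p2 := hpos.ra_lo
  have p3 := hpos.ra_hi
  have hsp : (v.reg .rsp).toNat = g.R := by
    rw [hfr0.rsp]
    exact toNat_addr _ (by omega)
  have c_rbx := h.rbx
  have c_r13 := h.r13
  have c_r14 := h.cur.r14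
  have w_eq : Mem.EqOn Vorbis.L.textLo Vorbis.L.textHi u₀.mem v.mem := h.frame.code
  have hdf : v.flags .df = false := (show abiInv _ from h.frame.inv).1
  have hmx : v.mxcsr &&& 0x1F80 = 0x1F80 := (show abiInv _ from h.frame.inv).2
  have hsse := Vorbis.sseOK_of_abiInv h.frame.inv
  have hRA : g.RA = (g.e.reg .rsp).toNat := rfl
  have hslotf : v.mem.readLE (v.reg .rsp + 24) 8 = g.f := by
    have := h.cur.slot_f
    rw [hfr0.rsp]
    simp only [vfield]
    exact this
  obtain ⟨hf1, hf2, hf3⟩ := c5c_obj_where hcur hshad hfr0.offText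
  -- the struct `c = cb(i)`: inside the codebooks block
  have ha := hcur.sd.arena
  have hcbk := hcur.ages.cbOK
  have hBA : A.1.Blk (codebooksBlock v.mem g.f) := hcbk.F2.mono hcur.ages.exti
  have hcin := hcbk.cb_in i hcur.lt
  have hboff := ha.block_off hBA
  have hbin := arena_inside ha hBA
  have hbnd := ha.bounds
  simp only [vblock, Off.sizeof.Codebook] at hcin hboff hbin
  have hcdef : stb_vorbis.codebooks_at v.mem g.f i = g.cb v.mem i := rfl
  rw [hcdef] at hcin
  have hBA' : A.1.Block (stb_vorbis.codebooks v.mem g.f) (2120 * (stb_vorbis.codebook_count v.mem g.f).toNat) := hBA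
  have t13 : (v.reg .r13).toNat = g.cb v.mem i + 4 := by
    rw [c_r13]
    exact toNat_addr _ (by omega)
  have e4 : addr (g.cb v.mem i) + 4 = addr (g.cb v.mem i + 4) := Vorbis.addr_add_lit _ 4
  -- `entries` as the 32-bit word the code loads
  have hnn := h.k1.ent_nonneg
  have hlt := h.k1.ent_lt
  have hEv : v.mem.readLE (addr (g.cb v.mem i) + 4) 4 = (Codebook.entries v.mem (g.cb v.mem i)).toNat := by
    rw [e4]
    have ee : Codebook.entries v.mem (g.cb v.mem i) = sint32 (v.mem.readLE (addr (g.cb v.mem i + 4)) 4) := by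
      simp only [vacc, voff, Mem.i32, Mem.u32]
    have hc := sint32_cases (v.mem.readLE (addr (g.cb v.mem i + 4)) 4)
    rw [ee]
    rw [ee] at hnn
    rcases hc with ⟨_, h2⟩ | ⟨_, h2⟩
    · rw [h2]
      exact (Int.toNat_natCast _).symm
    · have hlt' : v.mem.readLE (addr (g.cb v.mem i + 4)) 4 < 256 ^ 4 := Mem.readLE_lt' v.mem _ 4
      rw [h2] at hnn
      omega
  -- P1 = (lengths, E) is the top (the only) temp block: `lengths = B + T`
  have ht1 : A.1.temps = [(lengths - A.1.B, (Codebook.entries v.mem (g.cb v.mem i)).toNat)] := h.temps.1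
  have ht2 : A.1.B ≤ lengths := h.temps.2 (lengths, _) (List.mem_singleton.mpr rfl)
  obtain ⟨htop, htopL⟩ := ha.top_eq_T ht1
  have hT : A.1.temps = [(A.1.T, (Codebook.entries v.mem (g.cb v.mem i)).toNat)] := by
    rw [ht1, htop]
  have hl : lengths = A.1.B + A.1.T := by omega
  have p4 := hpos.ar_lo
  have hE24 : (Codebook.entries v.mem (g.cb v.mem i)).toNat < 2 ^ 24 := by omega
  have hfr := hfree A.2 g.frames' A.1 (Codebook.entries v.mem (g.cb v.mem i)).toNat []
  u_walk hcode [hμ.vendor] until [Vorbis.L.start_decoder.cut112] span [Vorbis.L.textLo, Vorbis.L.textHi] side (v_side)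
  case check_114620 =>
    have hun : ShadowUntouched v.mem s_114620.mem := by v_untouched
    have hsh' := hfr0.shadow.untouched hun
    refine ⟨hsh'.sealed, ?_⟩
    rw [toNat_addr _ (by omega)]
    exact ha.block_acc_inv hsh' hBA' (by omega) (by omega) (by decide)
  case call_inv => v_inv
  case pre_114631 =>
    have hun : ShadowUntouched v.mem s_114631.mem := by v_untouched
    refine (c5c_free_pre hfr0 hcur h.temps hun ?_ ?_ ?_ ?_ ?_).1
    · rw [w_mem]
      apply Mem.EqOn.writeLE
      · u_omega
      · u_omega
    · rw [w_rsp]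
      u_omega
    · rw [w_rdi]
      exact toNat_addr _ (by omega)
    · rw [w_rsi]
      exact toNat_addr _ (by omega)
    · rw [w_rdx, Vorbis.toNat_ofBV32, BitVec.toNat_ofNat]
      omega
  -- 0x114636: setup_temp_free(f, lengths, E) returned
  simp only [X86.User.Spec.footprint, vspec] at w_same
  have e_sp : (s_114631.reg .rsp).toNat + 8 = g.R := by
    rw [w_rsp_114631]
    u_omega
  have e_a : (v.reg .rsp - 8).toNat + 8 = g.R := by u_omega
  have e_rdi : (s_114631.reg .rdi).toNat = g.f := by
    rw [w_rdi_114631]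
    exact toNat_addr _ (by omega)
  have e_rsi : (s_114631.reg .rsi).toNat = A.1.B + A.1.T := by
    rw [w_rsi_114631, ← hl]
    exact toNat_addr _ (by omega)
  have e_rdx : (s_114631.reg .rdx).toNat % 2 ^ 32 = (Codebook.entries v.mem (g.cb v.mem i)).toNat := by
    rw [w_rdx_114631, Vorbis.toNat_ofBV32, BitVec.toNat_ofNat]
    omega
  have hne : s_114631.reg .rsi ≠ 0 := by
    intro h0
    rw [h0] at e_rsi
    have : (0 : Word).toNat = 0 := rfl
    omega
  obtain ⟨r1, r2, r3, r4⟩ := Cur.free_call hfr0 hcur w_mem_114631 e_a e_sp e_rdi hT e_rsi (by rw [e_rdx]) w_same w_post hne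
    w_rip w_rsp (Vorbis.conv_code_eqOn w_code) w_inv (w_kept.get .r14 rfl)
  apply ReachVia.done
  exact ⟨_, A2, A3, Ai, c5c_build h r1 r2 r3 r4 (fun B hB => hB) rfl⟩

end Vorbis.Spec.start_decoder_C5c

/-- The unit `start_decoder.C5c`. -/
theorem Vorbis.Spec.Worked.start_decoder_C5c_ok : Vorbis.Spec.start_decoder_C5c.Statement := Vorbis.Spec.start_decoder_C5c.c5c_walk
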